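-- pv_equiv track=rewrite | github.com/hacerkarayilan/PYTHON | remove_even_length.py | remove_even_length
-- ===== SOURCE A (Python) =====
-- def remove_even_length(list):
--     a=[]
--     for i in range(0,len(list)):
--         if len(list[i])%2==0:
--             a.append(list[i])
--     for i in range(0,len(a)):
--         list.remove(a[i])
--     return list
-- ===== SOURCE B (Python) =====
-- def remove_even_length(list):
--     # single-pass in-place compaction with a write pointer
--     w = 0
--     for x in list:
--         if len(x) % 2 == 1:
--             list[w] = x
--             w += 1
--     del list[w:]
--     return list
-- ===== Notes on version B (the rewrite author's own statement) =====
-- stated objective: faster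
-- what changed: Replaces A's two-pass collect-then-remove-by-value (each list.remove is a linear scan, quadratic overall) with a single-pass in-place write-pointer compaction on the same list object.
import Mathlib
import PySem

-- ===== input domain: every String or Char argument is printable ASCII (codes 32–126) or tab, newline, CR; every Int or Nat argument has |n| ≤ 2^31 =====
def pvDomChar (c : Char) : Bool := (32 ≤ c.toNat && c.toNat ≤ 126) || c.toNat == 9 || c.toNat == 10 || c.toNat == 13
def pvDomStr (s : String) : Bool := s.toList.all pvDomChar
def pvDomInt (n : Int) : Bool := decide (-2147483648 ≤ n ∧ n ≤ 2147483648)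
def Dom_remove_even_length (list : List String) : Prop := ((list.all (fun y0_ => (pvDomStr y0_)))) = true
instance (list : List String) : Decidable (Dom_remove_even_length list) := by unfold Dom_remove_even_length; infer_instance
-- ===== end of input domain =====

-- B replaces A's two-pass collect-then-remove-by-value with a single-pass write-pointer
-- compaction on the same list (return value proved equal; both mutate the argument in Python).


-- ===== PORT A =====
-- 'for i in range(0,len(list))' indexes in range, so pyGetD's default "" is never used (exact);
-- every a[i] is present when removed, so remove? always returns some and '.getD l' is never the
-- default either (list.remove never raises here).
def remove_even_length (list : List String) : List String :=
  let a := (PySem.List.pyRange 0 (list.length : Int) 1).foldl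
    (fun a i =>
      if PySem.Int.mod (PySem.Str.len (PySem.List.pyGetD list i "")) 2 == 0
      then a ++ [PySem.List.pyGetD list i ""] else a) ([] : List String)
  (PySem.List.pyRange 0 (a.length : Int) 1).foldl
    (fun l i => (PySem.List.remove? l (PySem.List.pyGetD a i "")).getD l) list

-- ===== PORT B =====
-- the accumulator is the already-compacted prefix list[0:w]; 'del list[w:]' makes it the result
def remove_even_length_alt (list : List String) : List String :=
  list.foldl
    (fun kept x => if PySem.Int.mod (PySem.Str.len x) 2 == 1 then kept ++ [x] else kept)
    ([] : List String)

-- ===== PRECONDITION & SPEC =====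
def Spec_remove_even_length (list : List String) (out : List String) : Prop := out = remove_even_length_alt list
instance (list : List String) (out : List String) : Decidable (Spec_remove_even_length list out) := by unfold Spec_remove_even_length; infer_instance

-- ===== CLAIM (what is proved, stated in full; the proofs are below) =====
def Claim_equal_remove_even_length : Prop := ∀ (list : List String), Dom_remove_even_length list → Spec_remove_even_length list (remove_even_length list)

-- ===== LEMMAS AND PROOFS =====

-- the "even length" test of A
def pvEven (x : String) : Bool := PySem.Int.mod (PySem.Str.len x) 2 == 0

-- one removal step of A's second loop
def pvRm (t : List String) (v : String) : List String := (PySem.List.remove? t v).getD t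

lemma pvRm_cons_of_ne {x v : String} (t : List String) (h : x ≠ v) :
    pvRm (x :: t) v = x :: pvRm t v := by
  unfold pvRm
  rw [PySem.List.remove?_cons_of_ne t h]
  cases PySem.List.remove? t v <;> rfl

lemma pvFoldRm_cons (a : List String) (ha : ∀ v ∈ a, pvEven v = true)
    {x : String} (hx : pvEven x = false) (t : List String) :
    a.foldl pvRm (x :: t) = x :: a.foldl pvRm t := by
  induction a generalizing t with
  | nil => rfl
  | cons v a ih =>
    have hne : x ≠ v := by
      intro h; subst h
      exact absurd (ha x (List.mem_cons_self)) (by simp [hx])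
    simp only [List.foldl_cons, pvRm_cons_of_ne t hne]
    exact ih (fun w hw => ha w (List.mem_cons_of_mem _ hw)) _

lemma pvRemoveAll (l : List String) :
    (l.filter pvEven).foldl pvRm l = l.filter (fun x => !pvEven x) := by
  induction l with
  | nil => rfl
  | cons x t ih =>
    by_cases hx : pvEven x = true
    · rw [List.filter_cons_of_pos hx, List.filter_cons_of_neg (by simp [hx]),
        List.foldl_cons]
      have hr : pvRm (x :: t) x = t := by simp [pvRm]
      rw [hr, ih]
    · have hx' : pvEven x = false := by simpa using hx
      rw [List.filter_cons_of_neg (by simp [hx']), List.filter_cons_of_pos (by simp [hx'])]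
      rw [pvFoldRm_cons _ (fun v hv => (List.mem_filter.mp hv).2) hx' t, ih]

lemma pvOdd_eq_not_even (x : String) :
    (PySem.Int.mod (PySem.Str.len x) 2 == 1) = !pvEven x := by
  unfold pvEven
  rcases PySem.Int.mod_two_eq (PySem.Str.len x) with h | h <;> rw [h] <;> decide

-- ===== VERDICT (by name: the statement is the Claim_ definition above) =====
theorem remove_even_length_spec : Claim_equal_remove_even_length := by
  intro list _
  unfold Spec_remove_even_length remove_even_length remove_even_length_alt
  rw [PySem.List.foldl_pyRange_zero_pyGetD' list ""
    (fun a x => if PySem.Int.mod (PySem.Str.len x) 2 == 0 then a ++ [x] else a) []]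
  rw [PySem.List.foldl_append_if_eq_filter]
  have ha : (list.filter fun x => PySem.Int.mod (PySem.Str.len x) 2 == 0)
      = list.filter pvEven := rfl
  rw [List.nil_append, ha]
  rw [PySem.List.foldl_pyRange_zero_pyGetD' (list.filter pvEven) ""
    (fun l v => (PySem.List.remove? l v).getD l) list]
  have : (list.filter pvEven).foldl (fun l v => (PySem.List.remove? l v).getD l) list
      = (list.filter pvEven).foldl pvRm list := rfl
  rw [this, pvRemoveAll]
  rw [PySem.List.foldl_append_if_eq_filter]
  simp only [List.nil_append]
  congr 1
  funext x
  exact (pvOdd_eq_not_even x).symm
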